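-- pv_equiv track=rewrite | github.com/tensorflow/autograph | reference_tests/loop_with_else_test.py | while_else
-- ===== SOURCE A (Python) =====
-- def while_else(x, y):
--   s = 0
--   while x > 0:
--     x -= 1
--     if x > y:
--       break
--     s += x
--   else:
--     s = -100
--   return s
-- ===== SOURCE B (Python) =====
-- def while_else(x, y):
--     # Closed form: the loop can only break on its first iteration (after the
--     # decrement x-1 values only decrease below y); any non-break exit hits else.
--     return 0 if x > 0 and x - 1 > y else -100
-- ===== Notes on version B (the rewrite author's own statement) =====
-- stated objective: faster
-- what changed: Replaced the while/else loop by the closed-form branch: the loop can only break on its first iteration, and every non-break exit sets s=-100, so the result is 0 iff x>0 and x-1>y, else -100.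
import Mathlib
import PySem

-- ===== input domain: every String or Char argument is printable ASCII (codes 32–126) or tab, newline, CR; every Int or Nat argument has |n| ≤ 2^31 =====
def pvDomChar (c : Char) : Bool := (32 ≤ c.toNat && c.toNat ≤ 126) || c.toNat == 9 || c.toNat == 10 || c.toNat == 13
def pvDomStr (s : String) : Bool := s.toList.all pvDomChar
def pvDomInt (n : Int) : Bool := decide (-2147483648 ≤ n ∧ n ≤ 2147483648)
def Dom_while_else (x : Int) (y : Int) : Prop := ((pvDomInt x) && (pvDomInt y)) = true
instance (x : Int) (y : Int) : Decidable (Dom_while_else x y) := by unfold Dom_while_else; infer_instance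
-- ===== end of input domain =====

-- B replaces A's while/else loop by an O(1) closed-form branch (timing: asymptotic speed-up).

-- ===== PORT A =====
-- The while loop runs at most x.toNat iterations (x decreases by 1 each pass,
-- and the guard is x > 0), so x.toNat is exact fuel; fuel exhaustion = guard
-- false = Python's `else:` branch (s = -100).
def while_else_go : Nat → Int → Int → Int → Int
  | 0, _, _, _ => -100                      -- while-guard false: else branch, s = -100
  | n + 1, x, y, s =>
    let x' := x - 1                          -- x -= 1
    if x' > y then s                         -- break: return current s
    else while_else_go n x' y (s + x')       -- s += x; continue

def while_else (x : Int) (y : Int) : Int :=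
  while_else_go x.toNat x y 0

-- ===== PORT B =====
def while_else_alt (x : Int) (y : Int) : Int :=
  if x > 0 ∧ x - 1 > y then 0 else -100

-- ===== PRECONDITION & SPEC =====
def Spec_while_else (x : Int) (y : Int) (out : Int) : Prop := out = while_else_alt x y
instance (x : Int) (y : Int) (out : Int) : Decidable (Spec_while_else x y out) := by unfold Spec_while_else; infer_instance

-- ===== CLAIM (what is proved, stated in full; the proofs are below) =====
def Claim_equal_while_else : Prop := ∀ (x : Int) (y : Int), Dom_while_else x y → Spec_while_else x y (while_else x y)

-- ===== LEMMAS AND PROOFS =====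

-- Once x ≤ y + 1, every later decremented value stays ≤ y, the break never
-- fires, and the loop ends in the else branch with s = -100.
theorem while_else_go_no_break (n : Nat) (x y s : Int) (h : x ≤ y + 1) :
    while_else_go n x y s = -100 := by
  induction n generalizing x s with
  | zero => rfl
  | succ n ih =>
    simp only [while_else_go]
    rw [if_neg (by omega)]
    exact ih (x - 1) (s + (x - 1)) (by omega)

-- ===== VERDICT (by name: the statement is the Claim_ definition above) =====
theorem while_else_spec : Claim_equal_while_else := by
  intro x y _
  unfold Spec_while_else while_else while_else_alt
  by_cases hx : x > 0
  · obtain ⟨n, hn⟩ : ∃ n, x.toNat = n + 1 := ⟨x.toNat - 1, by omega⟩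
    rw [hn]
    simp only [while_else_go]
    by_cases hb : x - 1 > y
    · rw [if_pos hb, if_pos ⟨hx, hb⟩]
    · rw [if_neg hb, if_neg (by tauto),
        while_else_go_no_break n (x - 1) y (0 + (x - 1)) (by omega)]
  · have : x.toNat = 0 := by omega
    rw [this]
    simp only [while_else_go]
    rw [if_neg (by tauto)]
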